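-- pv_equiv track=rewrite | github.com/alfredohernandezinostroza/mesh_experiments | embedding_keywords/td_idf_to_keywords_per_cluster.py | load_synonym_map
-- ===== SOURCE A (Python) =====
-- def normalize_keyword(keyword: str) -> str:
--     """Normalize a keyword to lowercase."""
--     return keyword.lower()
--
-- def load_synonym_map(synonym_dict: dict) -> dict:
--     """
--     Creates a canonical keyword map with better handling of circular references.
--     Chooses the shortest term as canonical to prefer simpler forms.
--     """
--     canonical_map = {}
--
--     # First pass: identify all unique terms and group them
--     term_groups = {}
--     for key, values in synonym_dict.items():
--         all_variants = [key] + values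
--         # Normalize all variants
--         norm_variants = [normalize_keyword(v) for v in all_variants]
--
--         # Find shortest normalized form as canonical
--         canonical = min(norm_variants, key=len)
--
--         for norm_variant in norm_variants:
--             if norm_variant not in canonical_map:
--                 canonical_map[norm_variant] = canonical
--             elif canonical_map[norm_variant] != canonical:
--                 # Handle conflicts: keep the shorter canonical form
--                 existing = canonical_map[norm_variant]
--                 if len(canonical) < len(existing):
--                     canonical_map[norm_variant] = canonical
--
--     return canonical_map
-- ===== SOURCE B (Python) =====
-- def normalize_keyword(keyword: str) -> str:
--     """Normalize a keyword to lowercase."""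
--     return keyword.lower()
--
-- def load_synonym_map(synonym_dict: dict) -> dict:
--     """Group candidate canonicals per normalized keyword, then reduce each
--     group with a stable min-by-length (first minimal candidate wins)."""
--     candidates = {}
--     for key, values in synonym_dict.items():
--         norm_variants = [normalize_keyword(v) for v in [key] + values]
--         canonical = min(norm_variants, key=len)
--         for nv in norm_variants:
--             candidates.setdefault(nv, []).append(canonical)
--     return {nv: min(cands, key=len) for nv, cands in candidates.items()}
-- ===== Notes on version B (the rewrite author's own statement) =====
-- stated objective: simpler
-- what changed: Instead of maintaining the resolved map with an in-loop conflict-resolution branch (insert / compare / conditionally overwrite), B first groups every candidate canonical per normalized keyword in an association of lists and then reduces each group with one stable min-by-length, dropping A's dead term_groups variable and the three-way branch.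
import Mathlib
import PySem

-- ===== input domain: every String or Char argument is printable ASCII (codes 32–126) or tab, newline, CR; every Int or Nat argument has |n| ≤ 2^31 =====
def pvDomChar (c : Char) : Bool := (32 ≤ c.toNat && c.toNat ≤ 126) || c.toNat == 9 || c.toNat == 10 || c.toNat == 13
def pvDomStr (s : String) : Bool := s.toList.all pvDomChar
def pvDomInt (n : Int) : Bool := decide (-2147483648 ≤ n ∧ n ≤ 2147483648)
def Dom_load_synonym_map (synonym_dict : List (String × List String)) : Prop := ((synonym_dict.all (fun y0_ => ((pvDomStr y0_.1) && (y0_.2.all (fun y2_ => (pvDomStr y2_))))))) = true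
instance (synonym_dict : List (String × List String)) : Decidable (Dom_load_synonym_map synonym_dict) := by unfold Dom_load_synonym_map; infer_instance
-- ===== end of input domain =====

-- B groups the candidate canonicals per normalized keyword and reduces each group with one
-- stable min-by-length, replacing A's in-loop three-way conflict-resolution branch (simpler).

-- Python's min(xs, key=len); every call site passes a nonempty list, "" is an unreachable guard
def pyMinLen (xs : List String) : String := (PySem.List.min? xs PySem.Str.len).getD ""

def normalize_keyword (keyword : String) : String := PySem.Str.lower keyword

-- ===== PORT A =====
-- body of A's inner loop over norm_variants
def pvStepA (canonical : String) (cm : PySem.Dict String String) (nv : String) :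
    PySem.Dict String String :=
  if cm.contains nv = false then cm.insert nv canonical
  else if cm.getD nv "" ≠ canonical then
    -- existing = canonical_map[norm_variant] inlined
    if PySem.Str.len canonical < PySem.Str.len (cm.getD nv "") then cm.insert nv canonical
    else cm
  else cm

def load_synonym_map (synonym_dict : List (String × List String)) : List (String × String) :=
  let canonical_map : PySem.Dict String String :=
    synonym_dict.foldl (fun canonical_map kv =>
      let all_variants := kv.1 :: kv.2
      let norm_variants := all_variants.map normalize_keyword
      let canonical := pyMinLen norm_variants
      norm_variants.foldl (pvStepA canonical) canonical_map) PySem.Dict.empty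
  canonical_map.items

-- ===== PORT B =====
-- body of B's inner loop: candidates.setdefault(nv, []).append(canonical)
def pvStepB (canonical : String) (c : PySem.Dict String (List String)) (nv : String) :
    PySem.Dict String (List String) :=
  c.modify nv [] (· ++ [canonical])

def load_synonym_map_alt (synonym_dict : List (String × List String)) : List (String × String) :=
  let candidates : PySem.Dict String (List String) :=
    synonym_dict.foldl (fun candidates kv =>
      let norm_variants := (kv.1 :: kv.2).map normalize_keyword
      let canonical := pyMinLen norm_variants
      norm_variants.foldl (pvStepB canonical) candidates) PySem.Dict.empty
  candidates.items.map (fun p => (p.1, pyMinLen p.2))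

-- ===== PRECONDITION & SPEC =====
def Spec_load_synonym_map (synonym_dict : List (String × List String)) (out : List (String × String)) : Prop := out = load_synonym_map_alt synonym_dict
instance (synonym_dict : List (String × List String)) (out : List (String × String)) : Decidable (Spec_load_synonym_map synonym_dict out) := by unfold Spec_load_synonym_map; infer_instance

-- ===== CLAIM (what is proved, stated in full; the proofs are below) =====
def Claim_equal_load_synonym_map : Prop := ∀ (synonym_dict : List (String × List String)), Dom_load_synonym_map synonym_dict → Spec_load_synonym_map synonym_dict (load_synonym_map synonym_dict)

-- ===== LEMMAS AND PROOFS =====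

-- reduce a candidate group to its resolved canonical
def pvF (p : String × List String) : String × String := (p.1, pyMinLen p.2)

-- invariant relating A's resolved map to B's candidate-group map
def pvInv (cm : PySem.Dict String String) (c : PySem.Dict String (List String)) : Prop :=
  cm.items = c.items.map pvF ∧ (∀ p ∈ c.items, p.2 ≠ []) ∧ c.keys.Nodup

theorem pyMinLen_singleton (x : String) : pyMinLen [x] = x := rfl

theorem pyMinLen_append (xs : List String) (x : String) (h : xs ≠ []) :
    pyMinLen (xs ++ [x]) =
      if PySem.Str.len x < PySem.Str.len (pyMinLen xs) then x else pyMinLen xs := by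
  cases hm : PySem.List.min? xs PySem.Str.len with
  | none => exact absurd ((PySem.List.min?_eq_none_iff xs PySem.Str.len).1 hm) h
  | some m =>
    have hfold := hm
    simp only [PySem.List.min?] at hfold
    have hstep : PySem.List.min? (xs ++ [x]) PySem.Str.len =
        if PySem.Str.len x < PySem.Str.len m then some x else some m := by
      simp only [PySem.List.min?, List.foldl_append, hfold, List.foldl]
    simp only [pyMinLen, hstep, hm, Option.getD_some]
    split <;> rfl

theorem pv_get?_bridge (cm : PySem.Dict String String) (c : PySem.Dict String (List String))
    (h : cm.items = c.items.map pvF) (nv : String) :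
    cm.get? nv = (c.get? nv).map pyMinLen := by
  simp [PySem.Dict.get?, h, List.find?_map, Function.comp_def, pvF]

theorem pv_contains_bridge (cm : PySem.Dict String String) (c : PySem.Dict String (List String))
    (h : cm.items = c.items.map pvF) (nv : String) :
    cm.contains nv = c.contains nv := by
  simp [PySem.Dict.contains, h, List.any_map, Function.comp_def, pvF]

theorem pv_step (can nv : String) (cm : PySem.Dict String String)
    (c : PySem.Dict String (List String)) (hI : pvInv cm c) :
    pvInv (pvStepA can cm nv) (pvStepB can c nv) := by
  obtain ⟨h1, h2, h3⟩ := hI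
  have hget := pv_get?_bridge cm c h1 nv
  have hcont := pv_contains_bridge cm c h1 nv
  by_cases hc : c.contains nv = true
  · -- key already present: B appends to the group, A conditionally overwrites
    obtain ⟨cs, hcs⟩ : ∃ cs, c.get? nv = some cs := by
      cases hg : c.get? nv with
      | none => rw [PySem.Dict.get?_eq_none_iff_contains] at hg; simp [hg] at hc
      | some cs => exact ⟨cs, rfl⟩
    have hmem : (nv, cs) ∈ c.items := PySem.Dict.mem_items_of_get?_eq_some c hcs
    have hcs_ne : cs ≠ [] := h2 _ hmem
    have hgetA : cm.get? nv = some (pyMinLen cs) := by rw [hget, hcs]; rfl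
    have hcontA : cm.contains nv = true := by rw [hcont]; exact hc
    have hgetD : cm.getD nv "" = pyMinLen cs := by
      simp [PySem.Dict.getD, hgetA]
    have hgetDc : c.getD nv [] = cs := by simp [PySem.Dict.getD, hcs]
    have hB : (pvStepB can c nv) = c.insert nv (cs ++ [can]) := by
      simp [pvStepB, PySem.Dict.modify, hgetDc]
    have hBitems : (pvStepB can c nv).items =
        c.items.map (fun p => if p.1 == nv then (nv, cs ++ [can]) else p) := by
      rw [hB, PySem.Dict.items_insert_of_contains _ _ hc]
    have hmin := pyMinLen_append cs can hcs_ne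
    constructor
    · -- items relation
      by_cases hlt : PySem.Str.len can < PySem.Str.len (pyMinLen cs)
      · -- strictly shorter: A overwrites, the group min becomes can
        have hne' : pyMinLen cs ≠ can := by
          intro he; rw [he] at hlt; exact lt_irrefl _ hlt
        have hA : pvStepA can cm nv = cm.insert nv can := by
          unfold pvStepA
          rw [hcontA, hgetD, if_neg (by simp), if_pos hne', if_pos hlt]
        have hMin' : pyMinLen (cs ++ [can]) = can := by rw [hmin, if_pos hlt]
        rw [hA, PySem.Dict.items_insert_of_contains _ _ hcontA, hBitems, h1,
          List.map_map, List.map_map]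
        apply List.map_congr_left
        intro p _
        by_cases hp : p.1 = nv <;> simp [pvF, hp, hMin']
      · -- not shorter: A keeps its value, the group min is unchanged
        have hA : pvStepA can cm nv = cm := by
          unfold pvStepA
          rw [hcontA, hgetD, if_neg (by simp)]
          by_cases he : pyMinLen cs = can
          · rw [if_neg (not_not_intro he)]
          · rw [if_pos he, if_neg hlt]
        have hMin' : pyMinLen (cs ++ [can]) = pyMinLen cs := by rw [hmin, if_neg hlt]
        rw [hA, hBitems, List.map_map, h1]
        apply List.map_congr_left
        intro p hp
        by_cases hpk : p.1 = nv
        · have hp' : (p.1, p.2) ∈ c.items := hp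
          have := PySem.Dict.get?_of_mem_items c hp' h3
          rw [hpk, hcs] at this
          have hval : p.2 = cs := by injection this.symm
          simp [pvF, hpk, hMin', hval]
        · simp [pvF, hpk]
    constructor
    · -- groups stay nonempty
      intro p hp
      rw [hBitems] at hp
      obtain ⟨q, hq, hqe⟩ := List.mem_map.1 hp
      by_cases hqk : q.1 == nv
      · rw [if_pos hqk] at hqe; rw [← hqe]; simp
      · rw [if_neg (by simpa using hqk)] at hqe; rw [← hqe]; exact h2 _ hq
    · -- keys stay Nodup
      rw [hB]; exact PySem.Dict.nodup_keys_insert _ _ _ h3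
  · -- fresh key: both append a new entry
    have hc' : c.contains nv = false := by simpa using hc
    have hgc : c.get? nv = none := (PySem.Dict.get?_eq_none_iff_contains c nv).2 hc'
    have hcontA : cm.contains nv = false := by rw [hcont]; exact hc'
    have hA : pvStepA can cm nv = cm.insert nv can := by simp [pvStepA, hcontA]
    have hgetDc : c.getD nv [] = [] := by simp [PySem.Dict.getD, hgc]
    have hB : pvStepB can c nv = c.insert nv [can] := by
      simp [pvStepB, PySem.Dict.modify, hgetDc]
    refine ⟨?_, ?_, ?_⟩
    · rw [hA, hB, PySem.Dict.items_insert_of_not_contains _ _ hcontA,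
        PySem.Dict.items_insert_of_not_contains _ _ hc', List.map_append, h1]
      simp [pvF, pyMinLen_singleton]
    · intro p hp
      rw [hB, PySem.Dict.items_insert_of_not_contains _ _ hc'] at hp
      rcases List.mem_append.1 hp with hp | hp
      · exact h2 _ hp
      · simp at hp; rw [hp]; simp
    · rw [hB]; exact PySem.Dict.nodup_keys_insert _ _ _ h3

theorem pv_inner (can : String) (norm : List String) :
    ∀ (cm : PySem.Dict String String) (c : PySem.Dict String (List String)),
      pvInv cm c → pvInv (norm.foldl (pvStepA can) cm) (norm.foldl (pvStepB can) c) := by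
  induction norm with
  | nil => intro cm c h; exact h
  | cons nv rest ih =>
    intro cm c h
    exact ih _ _ (pv_step can nv cm c h)

theorem pv_outer (sd : List (String × List String)) :
    ∀ (cm : PySem.Dict String String) (c : PySem.Dict String (List String)),
      pvInv cm c →
      pvInv
        (sd.foldl (fun canonical_map kv =>
          let all_variants := kv.1 :: kv.2
          let norm_variants := all_variants.map normalize_keyword
          let canonical := pyMinLen norm_variants
          norm_variants.foldl (pvStepA canonical) canonical_map) cm)
        (sd.foldl (fun candidates kv =>
          let norm_variants := (kv.1 :: kv.2).map normalize_keyword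
          let canonical := pyMinLen norm_variants
          norm_variants.foldl (pvStepB canonical) candidates) c) := by
  induction sd with
  | nil => intro cm c h; exact h
  | cons kv rest ih =>
    intro cm c h
    exact ih _ _ (pv_inner _ _ cm c h)

-- ===== VERDICT (by name: the statement is the Claim_ definition above) =====
theorem load_synonym_map_spec : Claim_equal_load_synonym_map := by
  intro sd _
  have h0 : pvInv PySem.Dict.empty PySem.Dict.empty := by
    refine ⟨rfl, ?_, ?_⟩ <;> simp [PySem.Dict.empty, PySem.Dict.keys]
  have h := (pv_outer sd PySem.Dict.empty PySem.Dict.empty h0).1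
  show load_synonym_map sd = load_synonym_map_alt sd
  simp only [load_synonym_map, load_synonym_map_alt]
  rw [h]
  rfl
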